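-- pv_equiv track=rewrite | github.com/ttzytt/PyAutoGrade | tests/Block 4/tested_code/13/Unit 1/List functions/list_functions.py | weird_double
-- ===== SOURCE A (Python) =====
-- def weird_double(numbers):
--     is_stopped = False
--     since_stopped = None
--     for i in range(len(numbers)):
--         if numbers[i] % 3 == 0:
--             is_stopped = True
--             since_stopped = 4
--
--         if since_stopped == 0:
--             is_stopped = False
--         if is_stopped:
--             since_stopped -= 1
--         else:
--             numbers[i] *= 2
--     return numbers
-- ===== SOURCE B (Python) =====
-- def weird_double(numbers):
--     # Double each element in place unless a multiple of 3 occurred within the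
--     # last 4 positions (including the current one); window scan instead of a
--     # carried state machine.  Mutates `numbers` in place, like the original.
--     for i in range(len(numbers)):
--         if not any(numbers[j] % 3 == 0 for j in range(max(0, i - 3), i + 1)):
--             numbers[i] *= 2
--     return numbers
-- ===== Notes on version B (the rewrite author's own statement) =====
-- stated objective: alternative
-- what changed: Replaces the carried is_stopped/since_stopped countdown state machine by a stateless per-index backward-window query: element i is doubled unless some position in [i-3, i] holds a multiple of 3 (doubling preserves divisibility by 3, so reading already-mutated earlier elements is sound).
import Mathlib
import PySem

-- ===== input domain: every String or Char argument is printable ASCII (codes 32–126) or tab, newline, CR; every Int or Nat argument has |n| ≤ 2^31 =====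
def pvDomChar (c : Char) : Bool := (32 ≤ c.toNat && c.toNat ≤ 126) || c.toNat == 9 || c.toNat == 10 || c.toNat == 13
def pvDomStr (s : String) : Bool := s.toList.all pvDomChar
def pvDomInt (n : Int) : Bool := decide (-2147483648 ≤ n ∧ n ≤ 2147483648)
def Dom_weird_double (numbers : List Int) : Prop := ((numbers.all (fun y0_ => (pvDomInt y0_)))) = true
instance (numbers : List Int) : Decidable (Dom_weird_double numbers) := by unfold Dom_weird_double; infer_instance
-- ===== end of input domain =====

-- B replaces A's carried is_stopped/since_stopped state machine by a stateless
-- per-index backward-window check; both mutate the list in place in Python,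
-- the theorems below are about the returned value.

-- ===== PORT A =====
-- loop body of A, one iteration of the for-loop (state: list, is_stopped, since_stopped)
def weirdStepA (st : List Int × Bool × Option Int) (i : Int) : List Int × Bool × Option Int :=
  let nums := st.1
  let s1 := if PySem.Int.mod (PySem.List.pyGetD nums i 0) 3 == 0 then (true, some (4:Int)) else st.2
  let stopped := if s1.2 == some 0 then false else s1.1
  if stopped then (nums, stopped, s1.2.map (· - 1))
  else (PySem.List.pySetD nums i (PySem.List.pyGetD nums i 0 * 2), stopped, s1.2)

def weird_double (numbers : List Int) : List Int :=
  ((PySem.List.pyRange 0 (numbers.length : Int) 1).foldl weirdStepA (numbers, false, none)).1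

-- ===== PORT B =====
-- loop body of B: double numbers[i] unless a multiple of 3 sits in the window [i-3, i]
def weirdStepB (acc : List Int) (i : Int) : List Int :=
  if !((PySem.List.pyRange (max 0 (i - 3)) (i + 1) 1).any
        (fun j => PySem.Int.mod (PySem.List.pyGetD acc j 0) 3 == 0))
  then PySem.List.pySetD acc i (PySem.List.pyGetD acc i 0 * 2)
  else acc

def weird_double_alt (numbers : List Int) : List Int :=
  (PySem.List.pyRange 0 (numbers.length : Int) 1).foldl weirdStepB numbers

-- ===== PRECONDITION & SPEC =====
def Spec_weird_double (numbers : List Int) (out : List Int) : Prop := out = weird_double_alt numbers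
instance (numbers : List Int) (out : List Int) : Decidable (Spec_weird_double numbers out) := by unfold Spec_weird_double; infer_instance

-- ===== CLAIM (what is proved, stated in full; the proofs are below) =====
def Claim_equal_weird_double : Prop := ∀ (numbers : List Int), Dom_weird_double numbers → Spec_weird_double numbers (weird_double numbers)

-- ===== LEMMAS AND PROOFS =====

-- no multiple of 3 among positions a ≤ k < b
def NoMult (acc : List Int) (a b : Nat) : Prop := ∀ k, a ≤ k → k < b → ¬ (3:Int) ∣ acc.getD k 0

-- relation between A's loop state before iteration i and the list contents:
-- either no multiple of 3 so far, or the last one sits at j and the state is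
-- the countdown determined by the distance i - j.
def InvA (acc : List Int) (i : Nat) (stopped : Bool) (since : Option Int) : Prop :=
  (stopped = false ∧ since = none ∧ NoMult acc 0 i)
  ∨ ∃ j : Nat, j < i ∧ (3:Int) ∣ acc.getD j 0 ∧ NoMult acc (j+1) i
      ∧ stopped = decide (i ≤ j + 4)
      ∧ since = some (max ((4:Int) - ((i:Int) - (j:Int))) 0)

lemma noMult_set (acc : List Int) (a b n : Nat) (v : Int) (hn : n < acc.length)
    (h : NoMult acc a b) (hv : ¬ (3:Int) ∣ v) : NoMult (acc.set n v) a b := by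
  intro k hk1 hk2
  by_cases hkn : k = n
  · subst hkn
    rw [List.getD_eq_getElem _ _ (by simpa using hn), List.getElem_set_self]
    exact hv
  · rw [List.getD, List.getElem?_set_ne (by omega)]
    exact h k hk1 hk2

lemma getD_set_ne (acc : List Int) (n k : Nat) (v d : Int) (h : k ≠ n) :
    (acc.set n v).getD k d = acc.getD k d := by
  rw [List.getD, List.getElem?_set_ne (by omega), List.getD]

-- B's window test, as a proposition
lemma windowAny (acc : List Int) (iN : Nat) :
    ((PySem.List.pyRange (max 0 ((iN:Int) - 3)) ((iN:Int) + 1) 1).any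
        (fun j => PySem.Int.mod (PySem.List.pyGetD acc j 0) 3 == 0)) = true
    ↔ ∃ jN : Nat, iN ≤ jN + 3 ∧ jN ≤ iN ∧ (3:Int) ∣ acc.getD jN 0 := by
  rw [List.any_eq_true]
  constructor
  · rintro ⟨j, hj, hm⟩
    rw [PySem.List.mem_pyRange_one] at hj
    have hj0 : 0 ≤ j := le_trans (le_max_left _ _) hj.1
    refine ⟨j.toNat, by omega, by omega, ?_⟩
    have : PySem.Int.mod (PySem.List.pyGetD acc j 0) 3 = 0 := by
      simpa using hm
    rw [PySem.Int.mod_eq_zero_iff_dvd, PySem.List.pyGetD_of_nonneg] at this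
    · simpa using this
    · exact hj0
  · rintro ⟨jN, h1, h2, h3⟩
    refine ⟨(jN:Int), ?_, ?_⟩
    · rw [PySem.List.mem_pyRange_one]
      constructor
      · apply max_le (by positivity) (by omega)
      · omega
    · simp only [beq_iff_eq]
      rw [PySem.Int.mod_eq_zero_iff_dvd, PySem.List.pyGetD_of_nonneg]
      · simpa using h3
      · positivity

-- the two loop bodies agree and preserve the invariant
lemma stepEq (acc : List Int) (iN : Nat) (stopped : Bool) (since : Option Int)
    (hlt : iN < acc.length) (hInv : InvA acc iN stopped since) :
    (weirdStepA (acc, stopped, since) (iN:Int)).1 = weirdStepB acc (iN:Int)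
    ∧ (weirdStepA (acc, stopped, since) (iN:Int)).1.length = acc.length
    ∧ InvA (weirdStepA (acc, stopped, since) (iN:Int)).1 (iN+1)
        (weirdStepA (acc, stopped, since) (iN:Int)).2.1
        (weirdStepA (acc, stopped, since) (iN:Int)).2.2 := by
  by_cases hm : (3:Int) ∣ acc.getD iN 0
  · -- numbers[i] is a multiple of 3: both sides leave it unchanged
    have hA : (PySem.Int.mod (PySem.List.pyGetD acc (iN:Int) 0) 3 == 0) = true := by
      simp only [PySem.List.pyGetD_natCast, beq_iff_eq, PySem.Int.mod_eq_zero_iff_dvd]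
      exact hm
    have hB : ((PySem.List.pyRange (max 0 ((iN:Int) - 3)) ((iN:Int) + 1) 1).any
        (fun j => PySem.Int.mod (PySem.List.pyGetD acc j 0) 3 == 0)) = true :=
      (windowAny acc iN).mpr ⟨iN, by omega, le_refl _, hm⟩
    have eA : weirdStepA (acc, stopped, since) (iN:Int) = (acc, true, some 3) := by
      simp only [weirdStepA]
      rw [hA]
      simp
    have eB : weirdStepB acc (iN:Int) = acc := by
      simp only [weirdStepB]
      rw [hB]
      simp
    rw [eA, eB]
    refine ⟨rfl, rfl, Or.inr ⟨iN, by omega, hm, ?_, ?_, ?_⟩⟩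
    · intro k h1 h2; omega
    · simp
    · show some 3 = some (max ((4:Int) - ((((iN+1:Nat)):Int) - (iN:Int))) 0)
      rw [show ((4:Int) - ((((iN+1:Nat)):Int) - (iN:Int))) = 3 by push_cast; ring,
        max_eq_left (by norm_num)]
  · -- numbers[i] is not a multiple of 3
    have hA : (PySem.Int.mod (PySem.List.pyGetD acc (iN:Int) 0) 3 == 0) = false := by
      simp only [PySem.List.pyGetD_natCast, beq_eq_false_iff_ne, ne_eq,
        PySem.Int.mod_eq_zero_iff_dvd]
      exact hm
    have hm2 : ¬ (3:Int) ∣ acc.getD iN 0 * 2 := by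
      rintro ⟨t, ht⟩
      exact hm ⟨acc.getD iN 0 - t, by omega⟩
    have hnm1 : ∀ a, NoMult acc a iN → NoMult acc a (iN+1) := by
      intro a h k h1 h2
      rcases Nat.lt_or_ge k iN with h' | h'
      · exact h k h1 h'
      · have : k = iN := by omega
        rwa [this]
    rcases hInv with ⟨hst, hsi, hnm⟩ | ⟨j, hji, hjm, hnm, hst, hsi⟩
    · -- no multiple of 3 seen yet: double
      subst hst hsi
      have hB : ((PySem.List.pyRange (max 0 ((iN:Int) - 3)) ((iN:Int) + 1) 1).any
          (fun j => PySem.Int.mod (PySem.List.pyGetD acc j 0) 3 == 0)) = false := by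
        rw [← Bool.not_eq_true, windowAny]
        rintro ⟨jN, _, h2, h3⟩
        rcases Nat.lt_or_ge jN iN with h | h
        · exact hnm jN (Nat.zero_le _) h h3
        · have hji2 : jN = iN := by omega
          rw [hji2] at h3
          exact hm h3
      have eA : weirdStepA (acc, false, none) (iN:Int)
          = (acc.set iN (acc.getD iN 0 * 2), false, none) := by
        simp only [weirdStepA]
        rw [hA]
        simp [List.getD]
      have eB : weirdStepB acc (iN:Int) = acc.set iN (acc.getD iN 0 * 2) := by
        simp only [weirdStepB]
        rw [hB]
        simp [List.getD]
      rw [eA, eB]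
      refine ⟨rfl, by simp, Or.inl ⟨rfl, rfl, noMult_set acc 0 (iN+1) iN _ hlt (hnm1 0 hnm) hm2⟩⟩
    · -- last multiple of 3 at position j < iN
      subst hst hsi
      rcases Nat.lt_or_ge (j+3) iN with hfar | hnear
      · -- window already clear: double, countdown stays at 0
        have hc0 : max ((4:Int) - ((iN:Int) - (j:Int))) 0 = 0 :=
          max_eq_right (by omega)
        have hB : ((PySem.List.pyRange (max 0 ((iN:Int) - 3)) ((iN:Int) + 1) 1).any
            (fun k => PySem.Int.mod (PySem.List.pyGetD acc k 0) 3 == 0)) = false := by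
          rw [← Bool.not_eq_true, windowAny]
          rintro ⟨jN, h1, h2, h3⟩
          rcases Nat.lt_or_ge jN iN with h | h
          · exact hnm jN (by omega) h h3
          · have hji2 : jN = iN := by omega
            rw [hji2] at h3
            exact hm h3
        have eA : weirdStepA (acc, decide (iN ≤ j + 4),
              some (max ((4:Int) - ((iN:Int) - (j:Int))) 0)) (iN:Int)
            = (acc.set iN (acc.getD iN 0 * 2), false, some 0) := by
          simp only [weirdStepA]
          rw [hA, hc0]
          simp [List.getD]
        have eB : weirdStepB acc (iN:Int) = acc.set iN (acc.getD iN 0 * 2) := by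
          simp only [weirdStepB]
          rw [hB]
          simp [List.getD]
        rw [eA, eB]
        refine ⟨rfl, by simp, Or.inr ⟨j, by omega, ?_, ?_, ?_, ?_⟩⟩
        · rwa [getD_set_ne acc iN j _ _ (by omega)]
        · exact noMult_set acc (j+1) (iN+1) iN _ hlt (hnm1 (j+1) hnm) hm2
        · symm
          rw [decide_eq_false_iff_not]
          omega
        · rw [max_eq_right (by omega)]
      · -- multiple within the window: suppress, decrement countdown
        have hcpos : max ((4:Int) - ((iN:Int) - (j:Int))) 0 = 4 - ((iN:Int) - (j:Int)) :=
          max_eq_left (by omega)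
        have hstv : decide (iN ≤ j + 4) = true := by simp; omega
        have hB : ((PySem.List.pyRange (max 0 ((iN:Int) - 3)) ((iN:Int) + 1) 1).any
            (fun k => PySem.Int.mod (PySem.List.pyGetD acc k 0) 3 == 0)) = true :=
          (windowAny acc iN).mpr ⟨j, by omega, by omega, hjm⟩
        have eA : weirdStepA (acc, decide (iN ≤ j + 4),
              some (max ((4:Int) - ((iN:Int) - (j:Int))) 0)) (iN:Int)
            = (acc, true, some (4 - ((iN:Int) - (j:Int)) - 1)) := by
          simp only [weirdStepA]
          rw [hA, hcpos, hstv]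
          have hne : (((4:Int) - ((iN:Int) - (j:Int)) = 0)) = False := by
            simp only [eq_iff_iff, iff_false]
            omega
          simp [hne]
        have eB : weirdStepB acc (iN:Int) = acc := by
          simp only [weirdStepB]
          rw [hB]
          simp
        rw [eA, eB]
        refine ⟨rfl, rfl, Or.inr ⟨j, by omega, hjm, hnm1 (j+1) hnm, ?_, ?_⟩⟩
        · symm
          rw [decide_eq_true_eq]
          omega
        · rw [max_eq_left (by omega)]
          simp only [Option.some.injEq]
          omega

-- main loop lemma
lemma loopEq : ∀ (k iN : Nat) (acc : List Int) (stopped : Bool) (since : Option Int)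
    (L : Nat), acc.length = L → iN + k = L → InvA acc iN stopped since →
    ((PySem.List.pyRange (iN:Int) (L:Int) 1).foldl weirdStepA (acc, stopped, since)).1
      = (PySem.List.pyRange (iN:Int) (L:Int) 1).foldl weirdStepB acc := by
  intro k
  induction k with
  | zero =>
    intro iN acc stopped since L hlen hik hinv
    rw [PySem.List.pyRange_one_eq_nil (by omega)]
    rfl
  | succ k ih =>
    intro iN acc stopped since L hlen hik hinv
    have hlt : iN < acc.length := by omega
    rw [PySem.List.pyRange_one_cons (by omega)]
    simp only [List.foldl_cons]
    obtain ⟨h1, h2, h3⟩ := stepEq acc iN stopped since hlt hinv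
    rw [← h1]
    have hcast : ((iN:Int) + 1) = (((iN+1 : Nat)):Int) := by push_cast; ring
    rw [hcast]
    exact ih (iN+1) _ _ _ L (h2.trans hlen) (by omega) h3

-- ===== VERDICT (by name: the statement is the Claim_ definition above) =====
theorem weird_double_spec : Claim_equal_weird_double := by
  intro numbers _
  unfold Spec_weird_double weird_double weird_double_alt
  have h0 : ((0:Int)) = ((0:Nat):Int) := by norm_num
  rw [h0]
  exact loopEq numbers.length 0 numbers false none numbers.length rfl (by omega)
    (Or.inl ⟨rfl, rfl, by intro k h1 h2; omega⟩)
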